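-- pv_equiv track=rewrite | github.com/dcorney/nanogenmo | tokenizers.py | process_ner_tags
-- ===== SOURCE A (Python) =====
-- def process_ner_tags(ner_tags):
--     "Merge adjacent tags of the same type \
--     (e.g. 'south' + 'africa' -> 'south africa')"
--     merged_tags = []
--     merged_token = ["", ""]
--     for idx, (token, ner_type) in enumerate(ner_tags):
--         if idx == 0:
--             merged_token = [token, ner_type]
--         else:
--             if ner_type == "O":
--                 merged_tags.append(merged_token)
--                 merged_token = [token, ner_type]
--             else:
--                 if ner_type == ner_tags[idx - 1][1]:
--                     merged_token[0] += " " + token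
--                     merged_token[1] = ner_type
--                 else:
--                     merged_tags.append(merged_token)
--                     merged_token = [token, ner_type]
--     merged_tags.append(merged_token)
--     return(merged_tags)
-- ===== SOURCE B (Python) =====
-- def process_ner_tags(ner_tags):
--     "Merge adjacent tags of the same type: find each maximal run of equal type, \
--     join non-O runs into one token, keep O tokens separate."
--     out = []
--     i, n = 0, len(ner_tags)
--     while i < n:
--         typ = ner_tags[i][1]
--         j = i
--         while j < n and ner_tags[j][1] == typ:
--             j += 1
--         tokens = [tok for tok, _ in ner_tags[i:j]]
--         if typ == "O":
--             out.extend([t, "O"] for t in tokens)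
--         else:
--             out.append([" ".join(tokens), typ])
--         i = j
--     return out
-- ===== Notes on version B (the rewrite author's own statement) =====
-- stated objective: alternative
-- what changed: Replaces A's incremental state machine (carrying a pending merged token, an index, and a lookup of the previous tag's type) by a run-based decomposition: find each maximal run of equal type with an inner scan, emit the whole run at once (joined for non-O, singletons for O).
-- intended difference: On the empty input A returns [['','']] (its never-initialised sentinel token gets flushed), while B returns [], the intended 'no tags in, no merged tags out'. — e.g. on process_ner_tags([]): A returns [["", ""]], B returns []
import Mathlib
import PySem

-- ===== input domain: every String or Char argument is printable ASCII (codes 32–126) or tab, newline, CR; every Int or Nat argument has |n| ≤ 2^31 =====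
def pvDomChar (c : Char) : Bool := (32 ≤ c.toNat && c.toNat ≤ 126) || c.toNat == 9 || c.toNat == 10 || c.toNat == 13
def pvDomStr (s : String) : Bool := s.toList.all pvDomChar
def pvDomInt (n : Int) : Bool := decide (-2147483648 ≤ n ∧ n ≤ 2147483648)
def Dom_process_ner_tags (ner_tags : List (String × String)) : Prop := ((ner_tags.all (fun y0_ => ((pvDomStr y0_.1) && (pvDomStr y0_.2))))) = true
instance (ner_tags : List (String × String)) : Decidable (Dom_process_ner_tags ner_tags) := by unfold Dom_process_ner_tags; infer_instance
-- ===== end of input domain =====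

-- B replaces A's incremental state machine by a run-based decomposition (find each
-- maximal run of equal type, emit it at once); on the empty input A returns [["",""]]
-- (flushed sentinel) while B returns [] — stated as the intended difference D_ below.


-- ===== PORT A =====
-- the for-loop of A, recursing on the remaining tags; idx and the whole ner_tags list
-- are carried so that the ner_tags[idx - 1][1] lookup is the same lookup A performs
def pvALoop (ner_tags : List (String × String)) (idx : Int)
    (merged_tags : List (List String)) (merged_token : List String) :
    List (String × String) → List (List String) × List String
  | [] => (merged_tags, merged_token)
  | (token, ner_type) :: rest =>
    if idx == 0 then
      pvALoop ner_tags (idx + 1) merged_tags [token, ner_type] rest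
    else if ner_type == "O" then
      pvALoop ner_tags (idx + 1) (merged_tags ++ [merged_token]) [token, ner_type] rest
    else if (PySem.List.pyGet? ner_tags (idx - 1)).map Prod.snd == some ner_type then
      -- merged_token[0] += " " + token; merged_token[1] = ner_type
      -- (merged_token always has exactly two cells; Python would raise otherwise)
      pvALoop ner_tags (idx + 1) merged_tags
        (match merged_token with
         | a :: _ :: r => (a ++ " " ++ token) :: ner_type :: r
         | mt => mt) rest
    else
      pvALoop ner_tags (idx + 1) (merged_tags ++ [merged_token]) [token, ner_type] rest

def process_ner_tags (ner_tags : List (String × String)) : List (List String) :=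
  let st := pvALoop ner_tags 0 [] ["", ""] ner_tags
  st.1 ++ [st.2]

-- ===== PORT B =====
-- inner while loop of B: tokens of the maximal run of type typ, and the remainder
def pvTakeRun (typ : String) : List (String × String) → List String × List (String × String)
  | [] => ([], [])
  | (tok, ty) :: rest =>
    if ty == typ then
      let r := pvTakeRun typ rest
      (tok :: r.1, r.2)
    else ([], (tok, ty) :: rest)

-- needed by the termination argument of process_ner_tags_alt
theorem pvTakeRun_length (typ : String) (l : List (String × String)) :
    (pvTakeRun typ l).2.length ≤ l.length := by
  induction l with
  | nil => simp [pvTakeRun]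
  | cons p rest ih =>
      obtain ⟨tok, ty⟩ := p
      simp only [pvTakeRun]
      split
      · simpa using Nat.le_succ_of_le ih
      · simp

-- outer while loop of B: one iteration per maximal run
def process_ner_tags_alt : List (String × String) → List (List String)
  | [] => []
  | (tok, typ) :: rest =>
    let r := pvTakeRun typ rest
    (if typ == "O" then (tok :: r.1).map (fun t => [t, "O"])
     else [[PySem.Str.join " " (tok :: r.1), typ]]) ++ process_ner_tags_alt r.2
  termination_by l => l.length
  decreasing_by simpa using Nat.lt_succ_of_le (pvTakeRun_length typ rest)

-- ===== PRECONDITION & SPEC =====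
-- On the empty input A returns [["",""]] (its never-initialised sentinel token gets
-- flushed), while B returns [], the intended "no tags in, no merged tags out".
def D_process_ner_tags (ner_tags : List (String × String)) : Prop := ner_tags = []
instance (ner_tags : List (String × String)) : Decidable (D_process_ner_tags ner_tags) := by unfold D_process_ner_tags; infer_instance

def Spec_process_ner_tags (ner_tags : List (String × String)) (out : List (List String)) : Prop := ¬ D_process_ner_tags ner_tags → out = process_ner_tags_alt ner_tags
instance (ner_tags : List (String × String)) (out : List (List String)) : Decidable (Spec_process_ner_tags ner_tags out) := by unfold Spec_process_ner_tags; infer_instance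

def pvDiffWitness_process_ner_tags : (List (String × String)) := []
def pvDiffWitnessOut_process_ner_tags : (List (List String)) × (List (List String)) := ([["", ""]], [])

-- ===== CLAIM (what is proved, stated in full; the proofs are below) =====
def Claim_unchanged_process_ner_tags : Prop := ∀ (ner_tags : List (String × String)), Dom_process_ner_tags ner_tags → Spec_process_ner_tags ner_tags (process_ner_tags ner_tags)
def Claim_changed_process_ner_tags : Prop := Dom_process_ner_tags (pvDiffWitness_process_ner_tags) ∧ D_process_ner_tags (pvDiffWitness_process_ner_tags) ∧ process_ner_tags (pvDiffWitness_process_ner_tags) = pvDiffWitnessOut_process_ner_tags.1 ∧ process_ner_tags_alt (pvDiffWitness_process_ner_tags) = pvDiffWitnessOut_process_ner_tags.2 ∧ pvDiffWitnessOut_process_ner_tags.1 ≠ pvDiffWitnessOut_process_ner_tags.2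
def Claim_exact_process_ner_tags : Prop := ∀ (ner_tags : List (String × String)), Dom_process_ner_tags ner_tags → D_process_ner_tags ner_tags → process_ner_tags ner_tags ≠ process_ner_tags_alt ner_tags

-- ===== LEMMAS AND PROOFS =====

theorem strJoin_singleton (s : String) : PySem.Str.join " " [s] = s := by
  simp [PySem.Str.join]

theorem strJoin_head (s tok : String) (ts : List String) :
    PySem.Str.join " " ((s ++ " " ++ tok) :: ts) = PySem.Str.join " " (s :: tok :: ts) := by
  cases ts with
  | nil => simp [PySem.Str.join, PySem.Chars.join_cons_cons]
  | cons u us => simp [PySem.Str.join, PySem.Chars.join_cons_cons]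

-- splitting an O-run into singletons and recursing on the remainder is just B on the list
theorem alt_O_run (rest : List (String × String)) :
    ((pvTakeRun "O" rest).1.map (fun t => [t, "O"])) ++ process_ner_tags_alt (pvTakeRun "O" rest).2
      = process_ner_tags_alt rest := by
  cases rest with
  | nil => simp [pvTakeRun, process_ner_tags_alt]
  | cons p r =>
      obtain ⟨t, ty⟩ := p
      by_cases h : ty = "O"
      · subst h
        simp [pvTakeRun, process_ner_tags_alt]
      · have hb : (ty == "O") = false := by simp [h]
        simp [pvTakeRun, process_ner_tags_alt, hb]

-- the "current run" continuation of A: cur = [s, typ] still pending, l remaining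
def pvG (s typ : String) (l : List (String × String)) : List (List String) :=
  if typ == "O" then [s, "O"] :: process_ner_tags_alt l
  else
    let r := pvTakeRun typ l
    [PySem.Str.join " " (s :: r.1), typ] :: process_ner_tags_alt r.2

theorem alt_cons_pvG (token ner_type : String) (rest : List (String × String)) :
    process_ner_tags_alt ((token, ner_type) :: rest) = pvG token ner_type rest := by
  by_cases h : ner_type = "O"
  · subst h
    simp only [process_ner_tags_alt, pvG, beq_self_eq_true, if_true]
    simpa using alt_O_run rest
  · have hb : (ner_type == "O") = false := by simp [h]
    simp [process_ner_tags_alt, pvG, hb]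

theorem pyGet_prev (pre l : List (String × String)) (h : pre ≠ []) :
    PySem.List.pyGet? (pre ++ l) ((pre.length : Int) - 1) = pre.getLast? := by
  have hlen : 0 < pre.length := List.length_pos_iff.mpr h
  have hcast : ((pre.length : Int) - 1) = ((pre.length - 1 : Nat) : Int) := by omega
  rw [hcast, PySem.List.pyGet?_natCast]
  rw [List.getElem?_append_left (by omega)]
  rw [List.getLast?_eq_getElem?]

theorem main_loop (l : List (String × String)) :
    ∀ (pre : List (String × String)) (acc : List (List String)) (s typ : String),
      pre ≠ [] → pre.getLast?.map Prod.snd = some typ →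
      (pvALoop (pre ++ l) (pre.length : Int) acc [s, typ] l).1
        ++ [(pvALoop (pre ++ l) (pre.length : Int) acc [s, typ] l).2]
        = acc ++ pvG s typ l := by
  induction l with
  | nil =>
      intro pre acc s typ hpre hlast
      simp only [pvALoop]
      by_cases h : typ = "O"
      · subst h
        simp [pvG, process_ner_tags_alt]
      · have hb : (typ == "O") = false := by simp [h]
        simp [pvG, hb, pvTakeRun, process_ner_tags_alt, strJoin_singleton]
  | cons p rest ih =>
      intro pre acc s typ hpre hlast
      obtain ⟨token, ner_type⟩ := p
      have hlen : 0 < pre.length := List.length_pos_iff.mpr hpre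
      have hidx : ((pre.length : Int) == 0) = false := by simp; omega
      have hget : PySem.List.pyGet? (pre ++ (token, ner_type) :: rest) ((pre.length : Int) - 1)
          = pre.getLast? := pyGet_prev pre _ hpre
      -- the recursive calls are at pre' = pre ++ [(token, ner_type)]
      have hpre' : pre ++ [(token, ner_type)] ≠ [] := by simp
      have hlast' : (pre ++ [(token, ner_type)]).getLast?.map Prod.snd = some ner_type := by
        simp
      have hlen' : (((pre ++ [(token, ner_type)]).length : Int)) = (pre.length : Int) + 1 := by
        simp
      have happ : (pre ++ [(token, ner_type)]) ++ rest = pre ++ (token, ner_type) :: rest := by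
        simp
      simp only [pvALoop]
      rw [if_neg (by simp [hidx])]
      by_cases hO : ner_type = "O"
      · subst hO
        rw [if_pos (by simp)]
        have hrec := ih (pre ++ [(token, "O")]) (acc ++ [[s, typ]]) token "O" hpre' hlast'
        rw [happ, hlen'] at hrec
        rw [hrec]
        by_cases hT : typ = "O"
        · subst hT
          simp [pvG, alt_cons_pvG]
        · have hbT : (typ == "O") = false := by simp [hT]
          have hbO : ("O" == typ) = false := by simp [Ne.symm hT]
          simp [pvG, hbT, pvTakeRun, hbO, strJoin_singleton, alt_cons_pvG]
      · rw [if_neg (by simp [hO])]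
        rw [hget, hlast]
        by_cases hEq : typ = ner_type
        · -- merge branch
          subst hEq
          rw [if_pos (by simp)]
          have hrec := ih (pre ++ [(token, typ)]) acc (s ++ " " ++ token) typ hpre' hlast'
          rw [happ, hlen'] at hrec
          rw [hrec]
          have hbT : (typ == "O") = false := by simp [hO]
          simp only [pvG, hbT, Bool.false_eq_true, if_false, pvTakeRun, beq_self_eq_true,
            if_true]
          rw [strJoin_head]
        · -- flush branch (different non-O type)
          rw [if_neg (by simp [hEq])]
          have hrec := ih (pre ++ [(token, ner_type)]) (acc ++ [[s, typ]]) token ner_type hpre' hlast'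
          rw [happ, hlen'] at hrec
          rw [hrec]
          by_cases hT : typ = "O"
          · subst hT
            simp [pvG, alt_cons_pvG]
          · have hbT : (typ == "O") = false := by simp [hT]
            have hbN : (ner_type == typ) = false := by simp [Ne.symm hEq]
            simp [pvG, hbT, pvTakeRun, hbN, strJoin_singleton, alt_cons_pvG]

-- ===== VERDICT (by name: the statement is the Claim_ definition above) =====
theorem process_ner_tags_spec : Claim_unchanged_process_ner_tags := by
  intro ner_tags _ hD
  cases ner_tags with
  | nil => exact absurd rfl hD
  | cons p rest =>
      obtain ⟨t0, ty0⟩ := p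
      show process_ner_tags _ = _
      unfold process_ner_tags
      have h0 : pvALoop ((t0, ty0) :: rest) 0 [] ["", ""] ((t0, ty0) :: rest)
          = pvALoop ((t0, ty0) :: rest) 1 [] [t0, ty0] rest := by
        simp [pvALoop]
      rw [h0]
      have hrec := main_loop rest [(t0, ty0)] [] t0 ty0 (by simp) (by simp)
      norm_num at hrec
      rw [hrec]
      exact (alt_cons_pvG t0 ty0 rest).symm

theorem process_ner_tags_changed : Claim_changed_process_ner_tags := by
  unfold Claim_changed_process_ner_tags
  refine ⟨by decide, rfl, by decide, ?_, by decide⟩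
  simp [pvDiffWitness_process_ner_tags, pvDiffWitnessOut_process_ner_tags,
    process_ner_tags_alt]

theorem process_ner_tags_tight : Claim_exact_process_ner_tags := by
  intro ner_tags _ hD
  subst hD
  intro h
  rw [show process_ner_tags_alt [] = [] from by simp [process_ner_tags_alt]] at h
  exact absurd h (by decide)
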